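-- pv_equiv track=rewrite | github.com/crashb/AoC-2017 | Solutions/Day09.py | runCancels
-- ===== SOURCE A (Python) =====
-- def runCancels(inputString):
-- 	output = ""
-- 	cancel = False
-- 	for char in inputString:
-- 		if cancel:
-- 			cancel = False
-- 			continue
-- 		if char == "!":
-- 			cancel = True
-- 			continue
-- 		output += char
-- 	return output
-- ===== SOURCE B (Python) =====
-- def runCancels(inputString):
-- 	parts = []
-- 	rest = inputString
-- 	while True:
-- 		j = rest.find('!')
-- 		if j == -1:
-- 			parts.append(rest)
-- 			break
-- 		parts.append(rest[:j])
-- 		rest = rest[j+2:]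
-- 	return ''.join(parts)
-- ===== Notes on version B (the rewrite author's own statement) =====
-- stated objective: faster
-- what changed: Replaces A's per-character state machine (cancel flag, char-by-char string concatenation) with find-based chunking: repeatedly locate the next '!' with str.find, emit the clean chunk before it, skip the '!' and the cancelled character, and join the chunks.
import Mathlib
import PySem

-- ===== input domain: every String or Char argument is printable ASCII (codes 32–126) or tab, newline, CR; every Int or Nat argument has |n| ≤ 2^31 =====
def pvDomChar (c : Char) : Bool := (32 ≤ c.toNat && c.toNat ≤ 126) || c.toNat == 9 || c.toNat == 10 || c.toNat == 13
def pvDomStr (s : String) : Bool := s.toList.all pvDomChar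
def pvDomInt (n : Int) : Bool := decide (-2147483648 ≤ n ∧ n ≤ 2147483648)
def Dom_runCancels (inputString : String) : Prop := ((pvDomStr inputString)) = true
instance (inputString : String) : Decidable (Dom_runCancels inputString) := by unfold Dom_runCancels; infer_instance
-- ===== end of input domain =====

-- B replaces A's per-character cancel-flag loop by find-based chunking: repeatedly locate the
-- next '!' and append the clean chunk before it, skipping the '!' and the cancelled character.

-- ===== PORT A =====
-- state machine: (output so far, cancel flag), one step per character, exactly A's loop
def runCancels (inputString : String) : String :=
  let st := inputString.toList.foldl
    (fun (acc : List Char × Bool) c =>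
      if acc.2 then (acc.1, false)
      else if c = '!' then (acc.1, true)
      else (acc.1 ++ [c], acc.2))
    ([], false)
  String.ofList st.1

-- ===== PORT B =====
-- termination helper: a found '!' lies inside the list, so the remainder shrinks
theorem pvFindMem {cs : List Char} (h : ¬ PySem.Chars.find cs ['!'] = -1) :
    (PySem.Chars.find cs ['!']).toNat < cs.length := by
  have hs := PySem.Chars.findFrom_natCast_spec cs ['!'] 0 (Nat.zero_le _)
    (by simp only [Nat.cast_zero, PySem.Chars.findFrom_zero]; exact h)
  simp only [Nat.cast_zero, PySem.Chars.findFrom_zero] at hs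
  have := hs.2.1.length_le
  simp only [List.length_drop, List.length_cons, List.length_nil] at this
  omega

-- Source B's loop: find the next '!' in the remainder, emit the chunk before it, drop '!' and the next char
def cancelsGo (rest : List Char) : List Char :=
  let j := PySem.Chars.find rest ['!']
  if _h : j = -1 then rest
  else
    rest.take j.toNat ++ cancelsGo (rest.drop (j.toNat + 2))
termination_by rest.length
decreasing_by
  have := pvFindMem _h
  simp only [List.length_drop]
  omega

def runCancels_alt (inputString : String) : String :=
  String.ofList (cancelsGo inputString.toList)

-- ===== PRECONDITION & SPEC =====
def Spec_runCancels (inputString : String) (out : String) : Prop := out = runCancels_alt inputString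
instance (inputString : String) (out : String) : Decidable (Spec_runCancels inputString out) := by unfold Spec_runCancels; infer_instance

-- ===== CLAIM (what is proved, stated in full; the proofs are below) =====
def Claim_equal_runCancels : Prop := ∀ (inputString : String), Dom_runCancels inputString → Spec_runCancels inputString (runCancels inputString)

-- ===== LEMMAS AND PROOFS =====

-- reference recursion: drop a '!' together with the following character, keep everything else
def skipRec : List Char → List Char
  | [] => []
  | c :: t => if c = '!' then skipRec t.tail else c :: skipRec t
termination_by cs => cs.length
decreasing_by
  · cases t <;> simp
  · simp

theorem skipRec_cons (c : Char) (t : List Char) :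
    skipRec (c :: t) = if c = '!' then skipRec t.tail else c :: skipRec t := by
  rw [skipRec]

theorem skipRec_clean {cs : List Char} (h : '!' ∉ cs) : skipRec cs = cs := by
  induction cs with
  | nil => simp [skipRec]
  | cons c t ih =>
    simp only [List.mem_cons, not_or] at h
    rw [skipRec_cons, if_neg (Ne.symm h.1), ih h.2]

theorem skipRec_clean_append {pre : List Char} (rest : List Char) (h : '!' ∉ pre) :
    skipRec (pre ++ rest) = pre ++ skipRec rest := by
  induction pre with
  | nil => simp
  | cons c t ih =>
    simp only [List.mem_cons, not_or] at h
    rw [List.cons_append, skipRec_cons, if_neg (Ne.symm h.1), ih h.2, List.cons_append]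

-- A's fold computes skipRec, for both values of the cancel flag
theorem foldA_eq (cs : List Char) : ∀ acc : List Char,
    (cs.foldl (fun (acc : List Char × Bool) c =>
      if acc.2 then (acc.1, false)
      else if c = '!' then (acc.1, true)
      else (acc.1 ++ [c], acc.2)) (acc, false)).1 = acc ++ skipRec cs
    ∧ (cs.foldl (fun (acc : List Char × Bool) c =>
      if acc.2 then (acc.1, false)
      else if c = '!' then (acc.1, true)
      else (acc.1 ++ [c], acc.2)) (acc, true)).1 = acc ++ skipRec cs.tail := by
  induction cs with
  | nil => intro acc; simp [skipRec]
  | cons c t ih =>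
    intro acc
    constructor
    · by_cases hc : c = '!'
      · simp only [List.foldl_cons, hc, skipRec_cons, Bool.false_eq_true,
          if_false, ite_true]
        exact (ih acc).2
      · simp only [List.foldl_cons, Bool.false_eq_true, if_false, if_neg hc,
          skipRec_cons]
      -- goal: fold t from (acc ++ [c], false) = acc ++ c :: skipRec t
        rw [(ih (acc ++ [c])).1, List.append_assoc]
        rfl
    · simp only [List.foldl_cons, List.tail_cons]
      exact (ih acc).1

-- B's find-based loop computes skipRec
theorem cancelsGo_eq_skipRec (cs : List Char) : cancelsGo cs = skipRec cs := by
  induction hn : cs.length using Nat.strong_induction_on generalizing cs with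
  | _ n ih =>
  rw [cancelsGo]
  by_cases h : PySem.Chars.find cs ['!'] = -1
  · rw [dif_pos h]
    have hnin : '!' ∉ cs := by
      have hninf := (PySem.Chars.find_eq_neg_one_iff cs ['!']).mp h
      intro hm
      obtain ⟨pre, suf, rfl⟩ := List.append_of_mem hm
      exact hninf ⟨pre, suf, by simp⟩
    rw [skipRec_clean hnin]
  · rw [dif_neg h]
    have hs := PySem.Chars.findFrom_natCast_spec cs ['!'] 0 (Nat.zero_le _)
      (by simp only [Nat.cast_zero, PySem.Chars.findFrom_zero]; exact h)
    simp only [Nat.cast_zero, PySem.Chars.findFrom_zero] at hs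
    set j := (PySem.Chars.find cs ['!']).toNat with hj
    have hjlt : j < cs.length := pvFindMem h
    -- cs.drop j starts with '!'
    obtain ⟨rest, hrest⟩ : ∃ rest, cs.drop j = '!' :: rest := by
      obtain ⟨t, ht⟩ := hs.2.1
      exact ⟨t, by simpa using ht.symm⟩
    -- the chunk before j is clean
    have hclean : '!' ∉ cs.take j := by
      intro hm
      obtain ⟨i, hi, hget⟩ := List.getElem_of_mem hm
      simp only [List.length_take] at hi
      have hil : i < j := lt_of_lt_of_le hi (min_le_left _ _)
      have hic : i < cs.length := by omega
      have hgi : cs[i] = '!' := by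
        rw [List.getElem_take] at hget; exact hget
      exact hs.2.2 i (Nat.zero_le _) hil
        ⟨cs.drop (i+1), by rw [← List.getElem_cons_drop hic, hgi]; rfl⟩
    have hdrop2 : cs.drop (j + 2) = rest.tail := by
      have h2 : cs.drop (j + 2) = (cs.drop j).drop 2 := by
        rw [List.drop_drop]
      rw [h2, hrest]
      cases rest <;> simp
    rw [ih (cs.drop (j + 2)).length (by simp only [List.length_drop]; omega) _ rfl]
    rw [hdrop2]
    conv_rhs => rw [← List.take_append_drop j cs]
    rw [skipRec_clean_append _ hclean, hrest, skipRec_cons, if_pos rfl]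

-- ===== VERDICT (by name: the statement is the Claim_ definition above) =====
theorem runCancels_spec : Claim_equal_runCancels := by
  intro s _
  unfold Spec_runCancels runCancels runCancels_alt
  rw [cancelsGo_eq_skipRec]
  exact congrArg String.ofList ((foldA_eq s.toList []).1.trans (by simp))
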